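-- pv_equiv track=rewrite | github.com/ArpBansal/ReconstructTriggers | train.py | _get_low_freq_indices
-- ===== SOURCE A (Python) =====
-- def _get_low_freq_indices(coeffs, n_keep):
--     """Get indices for keeping low-frequency wavelet coefficients"""
--     indices = []
--     start_idx = 0
--     remaining = n_keep
--
--     # Prioritize approximation coefficients (lowest frequency)
--     for level, coeff in enumerate(coeffs):
--         if remaining <= 0:
--             break
--         take = min(len(coeff), remaining)
--         indices.extend(range(start_idx, start_idx + take))
--         start_idx += len(coeff)
--         remaining -= take
--
--     return indices
-- ===== SOURCE B (Python) =====
-- def _get_low_freq_indices(coeffs, n_keep):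
--     """Get indices for keeping low-frequency wavelet coefficients"""
--     total = sum(len(c) for c in coeffs)
--     return list(range(min(n_keep, total)))
-- ===== Notes on version B (the rewrite author's own statement) =====
-- stated objective: simpler
-- what changed: Replaced the early-breaking per-level accumulation loop by a closed form: the result is always the contiguous block range(min(n_keep, total)), since levels are consumed in order and indices are consecutive.
import Mathlib
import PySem

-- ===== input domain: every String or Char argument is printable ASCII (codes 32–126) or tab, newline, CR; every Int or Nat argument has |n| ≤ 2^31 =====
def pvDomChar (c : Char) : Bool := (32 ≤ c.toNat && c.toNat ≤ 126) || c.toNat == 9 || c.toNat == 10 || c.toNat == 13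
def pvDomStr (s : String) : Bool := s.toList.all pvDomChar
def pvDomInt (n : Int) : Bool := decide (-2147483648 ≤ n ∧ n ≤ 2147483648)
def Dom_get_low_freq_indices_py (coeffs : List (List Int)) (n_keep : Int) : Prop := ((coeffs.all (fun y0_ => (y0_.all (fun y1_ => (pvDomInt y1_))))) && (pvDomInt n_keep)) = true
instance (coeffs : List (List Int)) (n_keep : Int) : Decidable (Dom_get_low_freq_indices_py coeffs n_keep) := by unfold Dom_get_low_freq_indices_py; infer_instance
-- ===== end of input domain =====

-- B replaces A's early-breaking per-level accumulation loop by the closed form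
-- range(min(n_keep, total)) (objective: simpler); same return value on all inputs.

-- ===== PORT A =====
-- the for/enumerate loop with state (indices, start_idx, remaining); 'break' = returning acc when remaining <= 0
def pvLoopA : List (List Int) → Int → Int → List Int → List Int
  | [], _, _, acc => acc
  | c :: rest, s, r, acc =>
      if r ≤ 0 then acc
      else
        let take := min (c.length : Int) r
        pvLoopA rest (s + c.length) (r - take) (acc ++ PySem.List.pyRange s (s + take) 1)

def get_low_freq_indices_py (coeffs : List (List Int)) (n_keep : Int) : List Int :=
  pvLoopA coeffs 0 n_keep []

-- ===== PORT B =====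
def get_low_freq_indices_py_alt (coeffs : List (List Int)) (n_keep : Int) : List Int :=
  let total : Int := (coeffs.map (fun c => (c.length : Int))).sum
  PySem.List.pyRange 0 (min n_keep total) 1

-- ===== PRECONDITION & SPEC =====
def Spec_get_low_freq_indices_py (coeffs : List (List Int)) (n_keep : Int) (out : List Int) : Prop := out = get_low_freq_indices_py_alt coeffs n_keep
instance (coeffs : List (List Int)) (n_keep : Int) (out : List Int) : Decidable (Spec_get_low_freq_indices_py coeffs n_keep out) := by unfold Spec_get_low_freq_indices_py; infer_instance

-- ===== CLAIM (what is proved, stated in full; the proofs are below) =====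
def Claim_equal_get_low_freq_indices_py : Prop := ∀ (coeffs : List (List Int)) (n_keep : Int), Dom_get_low_freq_indices_py coeffs n_keep → Spec_get_low_freq_indices_py coeffs n_keep (get_low_freq_indices_py coeffs n_keep)

-- ===== LEMMAS AND PROOFS =====

theorem pvLoopA_break (coeffs : List (List Int)) (s r : Int) (acc : List Int)
    (hr : r ≤ 0) : pvLoopA coeffs s r acc = acc := by
  cases coeffs with
  | nil => rfl
  | cons c rest => simp [pvLoopA, hr]

theorem pvLoopA_inv (coeffs : List (List Int)) (s r : Int) (hs : 0 ≤ s) :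
    pvLoopA coeffs s r (PySem.List.pyRange 0 s 1)
      = PySem.List.pyRange 0 (s + max 0 (min r ((coeffs.map (fun c => (c.length : Int))).sum))) 1 := by
  induction coeffs generalizing s r with
  | nil =>
      simp [pvLoopA]
  | cons c rest ih =>
      by_cases hr : r ≤ 0
      · rw [pvLoopA_break _ _ _ _ hr]
        congr 1
        have hT : 0 ≤ ((c :: rest).map (fun c => (c.length : Int))).sum := by
          simp only [List.map_cons, List.sum_cons]
          have : 0 ≤ ((rest.map (fun c => (c.length : Int))).sum) := by
            apply List.sum_nonneg; intro x hx; simp at hx; obtain ⟨y, _, hy⟩ := hx; omega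
          omega
        omega
      · push Not at hr
        simp only [pvLoopA, if_neg (by omega : ¬ r ≤ 0)]
        have hrest : 0 ≤ ((rest.map (fun c => (c.length : Int))).sum) := by
          apply List.sum_nonneg; intro x hx; simp at hx; obtain ⟨y, _, hy⟩ := hx; omega
        by_cases hc : (c.length : Int) ≤ r
        · -- full level taken
          have htake : min (c.length : Int) r = (c.length : Int) := by omega
          rw [htake]
          have happ : PySem.List.pyRange 0 s 1 ++ PySem.List.pyRange s (s + (c.length : Int)) 1
              = PySem.List.pyRange 0 (s + (c.length : Int)) 1 :=
            (PySem.List.pyRange_one_append 0 s (s + (c.length : Int)) hs (by omega)).symm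
          rw [happ, ih (s + (c.length : Int)) (r - (c.length : Int)) (by omega)]
          congr 1
          simp only [List.map_cons, List.sum_cons]
          omega
        · -- partial level: remaining hits 0, loop breaks on the next iteration
          push Not at hc
          have htake : min (c.length : Int) r = r := by omega
          rw [htake]
          have happ : PySem.List.pyRange 0 s 1 ++ PySem.List.pyRange s (s + r) 1
              = PySem.List.pyRange 0 (s + r) 1 :=
            (PySem.List.pyRange_one_append 0 s (s + r) hs (by omega)).symm
          rw [happ, pvLoopA_break _ _ _ _ (by omega : r - r ≤ 0)]
          congr 1
          simp only [List.map_cons, List.sum_cons]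
          omega

-- ===== VERDICT (by name: the statement is the Claim_ definition above) =====
theorem get_low_freq_indices_py_spec : Claim_equal_get_low_freq_indices_py := by
  intro coeffs n_keep _
  unfold Spec_get_low_freq_indices_py get_low_freq_indices_py get_low_freq_indices_py_alt
  have h0 : (PySem.List.pyRange 0 0 1) = ([] : List Int) := PySem.List.pyRange_one_eq_nil le_rfl
  rw [← h0, pvLoopA_inv coeffs 0 n_keep le_rfl]
  have hT : 0 ≤ ((coeffs.map (fun c => (c.length : Int))).sum) := by
    apply List.sum_nonneg; intro x hx; simp at hx; obtain ⟨y, _, hy⟩ := hx; omega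
  set T := (coeffs.map (fun c => (c.length : Int))).sum with hTdef
  by_cases h : min n_keep T ≤ 0
  · rw [PySem.List.pyRange_one_eq_nil (by omega), PySem.List.pyRange_one_eq_nil h]
  · congr 1
    omega
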